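-- pv_equiv track=rewrite | github.com/esrivas17/Advent_of_Code_2022 | day2/solution.py | entry_to_use
-- ===== SOURCE A (Python) =====
-- def rock_paper_scissors(entry1, entry2) -> int:
--     if entry1 == entry2:
--         return 3
--     if entry1 == 'rock' and entry2 == 'paper':
--         return 6
--     if entry1 == 'rock' and entry2 == 'scissors':
--         return 0
--     if entry1 == 'paper' and entry2 == 'rock':
--         return 0
--     if entry1 == 'paper' and entry2 == 'scissors':
--         return 6
--     if entry1 == 'scissors' and entry2 == 'rock':
--         return 6
--     if entry1 == 'scissors' and entry2 == 'paper':
--         return 0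
--
-- def entry_to_use(in1, outcome):
--     choices = ['rock', 'paper', 'scissors']
--     if outcome == 'Y':
--         return in1
--     if outcome == 'X':
--         for choice in choices:
--             score = rock_paper_scissors(in1, choice)
--             if score == 0:
--                 return choice
--     if outcome == 'Z':
--         for choice in choices:
--             score = rock_paper_scissors(in1, choice)
--             if score == 6:
--                 return choice
-- ===== SOURCE B (Python) =====
-- def entry_to_use(in1, outcome):
--     beats = {'rock': 'scissors', 'paper': 'rock', 'scissors': 'paper'}
--     beaten_by = {v: k for k, v in beats.items()}
--     if outcome == 'Y':
--         return in1
--     if outcome == 'X':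
--         return beats.get(in1)
--     if outcome == 'Z':
--         return beaten_by.get(in1)
--     return None
-- ===== Notes on version B (the rewrite author's own statement) =====
-- stated objective: simpler
-- what changed: Replaced the rock_paper_scissors scoring helper and the two scan loops over the choices list with two constant lookup tables (beats / beaten_by) queried directly.
import Mathlib
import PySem

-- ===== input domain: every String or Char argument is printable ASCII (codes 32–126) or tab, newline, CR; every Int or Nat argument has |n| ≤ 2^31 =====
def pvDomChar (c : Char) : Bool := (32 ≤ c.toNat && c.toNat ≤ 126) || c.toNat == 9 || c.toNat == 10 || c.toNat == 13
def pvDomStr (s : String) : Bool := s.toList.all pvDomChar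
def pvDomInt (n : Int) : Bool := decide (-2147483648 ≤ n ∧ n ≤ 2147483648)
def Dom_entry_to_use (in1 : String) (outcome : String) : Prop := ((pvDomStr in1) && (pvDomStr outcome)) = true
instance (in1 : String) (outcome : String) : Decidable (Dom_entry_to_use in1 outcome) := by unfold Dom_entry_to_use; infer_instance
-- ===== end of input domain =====

-- B replaces the scoring helper and the two scan loops by two constant lookup tables; return value only, no side effects.
-- ===== PORT A =====
def rock_paper_scissors (entry1 : String) (entry2 : String) : Option Int :=
  if entry1 = entry2 then some 3
  else if entry1 = "rock" ∧ entry2 = "paper" then some 6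
  else if entry1 = "rock" ∧ entry2 = "scissors" then some 0
  else if entry1 = "paper" ∧ entry2 = "rock" then some 0
  else if entry1 = "paper" ∧ entry2 = "scissors" then some 6
  else if entry1 = "scissors" ∧ entry2 = "rock" then some 6
  else if entry1 = "scissors" ∧ entry2 = "paper" then some 0
  else none

-- the 'for choice in choices: … if score == target: return choice' loop
def pvScanA (in1 : String) (target : Int) : List String → Option String
  | [] => none
  | c :: rest =>
      if rock_paper_scissors in1 c = some target then some c
      else pvScanA in1 target rest

def entry_to_use (in1 : String) (outcome : String) : Option String :=
  let choices := ["rock", "paper", "scissors"]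
  if outcome = "Y" then some in1
  else if outcome = "X" then
    match pvScanA in1 0 choices with
    | some c => some c
    | none => if outcome = "Z" then pvScanA in1 6 choices else none
  else if outcome = "Z" then pvScanA in1 6 choices
  else none

-- ===== PORT B =====
def pvBeats : PySem.Dict String String :=
  PySem.Dict.ofList [("rock", "scissors"), ("paper", "rock"), ("scissors", "paper")]

-- beaten_by = {v: k for k, v in beats.items()}
def pvBeatenBy : PySem.Dict String String :=
  (pvBeats.items.map (fun kv => (kv.2, kv.1))).foldl (fun d kv => d.insert kv.1 kv.2) PySem.Dict.empty

def entry_to_use_alt (in1 : String) (outcome : String) : Option String :=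
  if outcome = "Y" then some in1
  else if outcome = "X" then pvBeats.get? in1
  else if outcome = "Z" then pvBeatenBy.get? in1
  else none


-- ===== PRECONDITION & SPEC =====
def Spec_entry_to_use (in1 : String) (outcome : String) (out : Option String) : Prop := out = entry_to_use_alt in1 outcome
instance (in1 : String) (outcome : String) (out : Option String) : Decidable (Spec_entry_to_use in1 outcome out) := by unfold Spec_entry_to_use; infer_instance

-- ===== CLAIM (what is proved, stated in full; the proofs are below) =====
def Claim_equal_entry_to_use : Prop := ∀ (in1 : String) (outcome : String), Dom_entry_to_use in1 outcome → Spec_entry_to_use in1 outcome (entry_to_use in1 outcome)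

-- ===== LEMMAS AND PROOFS =====

-- ===== VERDICT (by name: the statement is the Claim_ definition above) =====
lemma pvBeats_eval : pvBeats = PySem.Dict.mk [("rock", "scissors"), ("paper", "rock"), ("scissors", "paper")] := by decide

lemma pvBeatenBy_eval : pvBeatenBy = PySem.Dict.mk [("scissors", "rock"), ("rock", "paper"), ("paper", "scissors")] := by decide

theorem entry_to_use_spec : Claim_equal_entry_to_use := by
  intro in1 outcome _
  unfold Spec_entry_to_use entry_to_use entry_to_use_alt
  by_cases hy : outcome = "Y"
  · simp [hy]
  by_cases hx : outcome = "X"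
  · subst hx
    by_cases h1 : in1 = "rock"
    · subst h1; rfl
    by_cases h2 : in1 = "paper"
    · subst h2; rfl
    by_cases h3 : in1 = "scissors"
    · subst h3; rfl
    simp [pvScanA, rock_paper_scissors, h1, h2, h3, pvBeats_eval,
      PySem.Dict.get?, beq_iff_eq, Ne.symm h1, Ne.symm h2, Ne.symm h3]
  by_cases hz : outcome = "Z"
  · subst hz
    by_cases h1 : in1 = "rock"
    · subst h1; rfl
    by_cases h2 : in1 = "paper"
    · subst h2; rfl
    by_cases h3 : in1 = "scissors"
    · subst h3; rfl
    simp [pvScanA, rock_paper_scissors, h1, h2, h3, pvBeatenBy_eval,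
      PySem.Dict.get?, beq_iff_eq, Ne.symm h1, Ne.symm h2, Ne.symm h3]
  · simp [hy, hx, hz]
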